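-- pv_equiv track=rewrite | github.com/TFSThiagoBR98/igz_parser | lib/utils.py | decode_delta
-- ===== SOURCE A (Python) =====
-- def decode_delta(payload, count, big_endian):
--     """Decode delta-encoded data"""
--     current = 0
--     result = []
--     bit_buffer = 0
--     bits_stored = 0
--     byte_idx = 0
--     nibble_idx = 0
--
--     while len(result) < count:
--         if byte_idx >= len(payload):
--             break
--
--         # Get next nibble (4 bits)
--         byte = payload[byte_idx]
--         nibble = (byte >> (4 * (1 - nibble_idx))) & 0x0F
--         nibble_idx = (nibble_idx + 1) % 2
--         if nibble_idx == 0: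
--             byte_idx += 1
--
--         # Process nibble
--         continuation = (nibble & 0x08) != 0
--         value = nibble & 0x07
--
--         # Add to bit buffer
--         bit_buffer |= value << bits_stored
--         bits_stored += 3
--
--         if not continuation:
--             # Finalize delta
--             delta = bit_buffer
--             bit_buffer = 0
--             bits_stored = 0
--
--             # Apply delta
--             current += delta
--             result.append(current)
--
--     # Handle remaining bits
--     if bits_stored > 0:
--         delta = bit_buffer
--         current += delta
--         result.append(current)
--
--     # Validate count
--     if len(result) != count:
--         raise ValueError("Delta decoding count mismatch")
--
--     return result
-- ===== SOURCE B (Python) =====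
-- def decode_delta(payload, count, big_endian):
--     """Decode delta-encoded data"""
--     # Phase 1: flatten the byte stream into the nibble stream (high first).
--     nibbles = [n for b in payload for n in ((b >> 4) & 0x0F, b & 0x0F)]
--
--     # Phase 2: decode ALL complete deltas, independent of count.
--     deltas = []
--     acc = 0
--     shift = 0
--     for nib in nibbles:
--         acc |= (nib & 0x07) << shift
--         shift += 3
--         if not (nib & 0x08):
--             deltas.append(acc)
--             acc = 0
--             shift = 0
--
--     # Phase 3: a trailing partial value counts only when it is exactly
--     # the one still missing.
--     if shift > 0 and count == len(deltas) + 1: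
--         deltas.append(acc)
--
--     if not (0 <= count <= len(deltas)):
--         raise ValueError("Delta decoding count mismatch")
--
--     # Phase 4: prefix sums of the first `count` deltas.
--     result = []
--     current = 0
--     for d in deltas[:count]:
--         current += d
--         result.append(current)
--     return result
-- ===== Notes on version B (the rewrite author's own statement) =====
-- stated objective: simpler
-- what changed: B replaces A's interleaved while-loop with byte_idx/nibble_idx cursor state by four plain phases: flatten the bytes into a nibble list, decode all complete deltas in one pass, arithmetically decide the trailing flush and the count check, then prefix-sum the first count deltas.
import Mathlib
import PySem

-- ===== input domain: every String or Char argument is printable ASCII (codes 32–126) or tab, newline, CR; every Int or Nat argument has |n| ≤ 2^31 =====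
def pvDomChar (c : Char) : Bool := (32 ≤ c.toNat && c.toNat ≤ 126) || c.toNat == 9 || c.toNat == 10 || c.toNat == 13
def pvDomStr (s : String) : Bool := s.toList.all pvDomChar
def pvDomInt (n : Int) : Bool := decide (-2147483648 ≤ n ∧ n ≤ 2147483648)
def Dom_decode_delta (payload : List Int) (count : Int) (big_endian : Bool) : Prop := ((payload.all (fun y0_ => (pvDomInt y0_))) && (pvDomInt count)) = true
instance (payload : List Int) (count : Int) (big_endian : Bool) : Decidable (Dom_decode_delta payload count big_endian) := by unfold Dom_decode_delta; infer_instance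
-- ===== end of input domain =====

-- ===== PORT A =====
-- B reorganises A's interleaved cursor loop into plain phases (flatten nibbles,
-- decode all deltas, arithmetic count check, prefix sums); return values proved equal on Pre_.
-- bits_stored is a non-negative Python counter, ported as Nat (the shift amount of <<<).
def decode_delta.loop (payload : List Int) (count : Int) :
    Nat → Int → List Int → Int → Nat → Int → Int → Int × List Int × Int × Nat
  | 0, current, result, bit_buffer, bits_stored, _, _ => (current, result, bit_buffer, bits_stored)
  | fuel + 1, current, result, bit_buffer, bits_stored, byte_idx, nibble_idx =>
      if (result.length : Int) < count then
        if byte_idx ≥ (payload.length : Int) then (current, result, bit_buffer, bits_stored)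
        else
          -- payload[byte_idx]: guarded in range and byte_idx ≥ 0 throughout, so the default is never used
          let byte := PySem.List.pyGetD payload byte_idx 0
          let nibble := PySem.Int.band (byte >>> (4 * (1 - nibble_idx)).toNat) 0x0F
          let nibble_idx' := PySem.Int.mod (nibble_idx + 1) 2
          let byte_idx' := if nibble_idx' = 0 then byte_idx + 1 else byte_idx
          let value := PySem.Int.band nibble 0x07
          let bit_buffer' := PySem.Int.bor bit_buffer (value <<< bits_stored)
          let bits_stored' := bits_stored + 3
          if PySem.Int.band nibble 0x08 ≠ 0 then
            decode_delta.loop payload count fuel current result bit_buffer' bits_stored' byte_idx' nibble_idx'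
          else
            decode_delta.loop payload count fuel (current + bit_buffer') (result ++ [current + bit_buffer']) 0 0 byte_idx' nibble_idx'
      else (current, result, bit_buffer, bits_stored)

-- fuel 2*len+1 is enough: each iteration consumes one nibble and there are 2*len of them.
-- Where len(result) ≠ count Python raises ValueError: those inputs are excluded by Pre_.
def decode_delta (payload : List Int) (count : Int) (big_endian : Bool) : List Int :=
  let s := decode_delta.loop payload count (2 * payload.length + 1) 0 [] 0 0 0 0
  if s.2.2.2 > 0 then s.2.1 ++ [s.1 + s.2.2.1] else s.2.1

-- ===== PORT B =====
-- Where B raises ValueError (¬ (0 ≤ count ≤ len(deltas))) the inputs are excluded by Pre_.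
def decode_delta_alt (payload : List Int) (count : Int) (big_endian : Bool) : List Int :=
  let nibbles := payload.flatMap (fun (b : Int) => [PySem.Int.band (b >>> (4 : Nat)) 0x0F, PySem.Int.band b 0x0F])
  let st := nibbles.foldl
    (fun (st : List Int × Int × Nat) nib =>
      let acc := PySem.Int.bor st.2.1 ((PySem.Int.band nib 0x07) <<< st.2.2)
      let shift := st.2.2 + 3
      if PySem.Int.band nib 0x08 = 0 then (st.1 ++ [acc], 0, 0) else (st.1, acc, shift))
    ([], 0, 0)
  let deltas := if st.2.2 > 0 ∧ count = (st.1.length : Int) + 1 then st.1 ++ [st.2.1] else st.1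
  let tr := PySem.List.slice deltas none (some count)     -- deltas[:count]
  (tr.foldl (fun (p : Int × List Int) d => (p.1 + d, p.2 ++ [p.1 + d])) (0, [])).2

-- ===== PRECONDITION & SPEC =====
-- the nibble stream of the payload, and the number of complete (continuation-clear) deltas in it
def pvNibs (payload : List Int) : List Int :=
  payload.flatMap (fun (b : Int) => [PySem.Int.band (b >>> (4 : Nat)) 0x0F, PySem.Int.band b 0x0F])
def pvK (payload : List Int) : Int :=
  (((pvNibs payload).filter (fun n => PySem.Int.band n 0x08 == 0)).length : Int)

-- Pre_ excludes exactly the inputs on which A raises ValueError ("count mismatch"): A returns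
-- normally iff count is between 0 and the number k of complete deltas, or count = k + 1 and the
-- nibble stream ends in a continuation nibble (so the trailing-bits flush supplies the last value).
def Pre_decode_delta (payload : List Int) (count : Int) (big_endian : Bool) : Prop :=
  0 ≤ count ∧
    (count ≤ pvK payload ∨
      (count = pvK payload + 1 ∧ pvNibs payload ≠ [] ∧
        PySem.Int.band ((pvNibs payload).getLast!) 0x08 ≠ 0))
instance (payload : List Int) (count : Int) (big_endian : Bool) :
    Decidable (Pre_decode_delta payload count big_endian) := by
  unfold Pre_decode_delta; infer_instance

def pvWitness_decode_delta : List Int × Int × Bool := ([0x12, 0x19], 3, false)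

def Spec_decode_delta (payload : List Int) (count : Int) (big_endian : Bool) (out : List Int) : Prop := out = decode_delta_alt payload count big_endian
instance (payload : List Int) (count : Int) (big_endian : Bool) (out : List Int) : Decidable (Spec_decode_delta payload count big_endian out) := by unfold Spec_decode_delta; infer_instance

-- ===== CLAIM (what is proved, stated in full; the proofs are below) =====
def Claim_equal_decode_delta : Prop := ∀ (payload : List Int) (count : Int) (big_endian : Bool), Dom_decode_delta payload count big_endian → Pre_decode_delta payload count big_endian → Spec_decode_delta payload count big_endian (decode_delta payload count big_endian)

-- ===== LEMMAS AND PROOFS =====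

-- B's phase 2 as a structural recursion: (complete deltas, pending acc, pending shift)
def pvCollect : List Int → Int → Nat → List Int × Int × Nat
  | [], acc, sh => ([], acc, sh)
  | nib :: rest, acc, sh =>
    let acc' := PySem.Int.bor acc ((PySem.Int.band nib 0x07) <<< sh)
    if PySem.Int.band nib 0x08 = 0 then
      let r := pvCollect rest 0 0
      (acc' :: r.1, r.2)
    else pvCollect rest acc' (sh + 3)

-- prefix sums starting from c
def pvPsums : Int → List Int → List Int
  | _, [] => []
  | c, d :: ds => (c + d) :: pvPsums (c + d) ds

-- A's loop re-expressed over the flattened nibble stream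
def pvAN (count : Int) : List Int → Int → List Int → Int → Nat → Int × List Int × Int × Nat
  | [], current, result, bb, bs => (current, result, bb, bs)
  | nib :: rest, current, result, bb, bs =>
    if (result.length : Int) < count then
      let bb' := PySem.Int.bor bb ((PySem.Int.band nib 0x07) <<< bs)
      if PySem.Int.band nib 0x08 ≠ 0 then pvAN count rest current result bb' (bs + 3)
      else pvAN count rest (current + bb') (result ++ [current + bb']) 0 0
    else (current, result, bb, bs)

lemma pvAN_stop (count : Int) (nibs : List Int) (current : Int) (result : List Int) (bb : Int)
    (bs : Nat) (h : ¬ (result.length : Int) < count) :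
    pvAN count nibs current result bb bs = (current, result, bb, bs) := by
  cases nibs with
  | nil => rfl
  | cons nib rest => simp [pvAN, h]

lemma len_pvNibs (l : List Int) : (pvNibs l).length = 2 * l.length := by
  induction l with
  | nil => rfl
  | cons x xs ih => simp [pvNibs] at ih ⊢; omega

-- A's fueled cursor loop equals the nibble-stream loop
lemma loop_eq_pvAN : ∀ (fuel : Nat) (payload : List Int) (count current : Int)
    (result : List Int) (bb : Int) (bs : Nat) (b : Nat) (ni : Int)
    (hni : ni = 0 ∨ (ni = 1 ∧ b < payload.length))
    (hrem : (if ni = 1 then PySem.Int.band (payload.getD b 0) 0x0F :: pvNibs (payload.drop (b + 1))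
             else pvNibs (payload.drop b)).length ≤ fuel),
    decode_delta.loop payload count fuel current result bb bs (b : Int) ni =
      pvAN count (if ni = 1 then PySem.Int.band (payload.getD b 0) 0x0F :: pvNibs (payload.drop (b + 1))
                  else pvNibs (payload.drop b)) current result bb bs := by
  intro fuel
  induction fuel with
  | zero =>
    intro payload count current result bb bs b ni hni hrem
    have hnil : (if ni = 1 then PySem.Int.band (payload.getD b 0) 0x0F :: pvNibs (payload.drop (b + 1))
        else pvNibs (payload.drop b)) = [] := by
      rcases hni with h0 | ⟨h1, _⟩
      · simp [h0] at hrem ⊢; omega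
      · simp [h1] at hrem
    rw [hnil]
    rfl
  | succ fuel ih =>
    intro payload count current result bb bs b ni hni hrem
    by_cases hc : (result.length : Int) < count
    · rcases hni with h0 | ⟨h1, hblt⟩
      · -- ni = 0 : next nibble is the high nibble of payload[b] (or the stream is exhausted)
        subst h0
        simp only [if_neg (by norm_num : ¬ (0 : Int) = 1)] at hrem ⊢
        by_cases hb : payload.length ≤ b
        · rw [List.drop_eq_nil_of_le hb]
          rw [decode_delta.loop, if_pos hc, if_pos (by exact_mod_cast hb)]
          rfl
        · push Not at hb
          have hgd : payload[b] = payload.getD b 0 := (List.getD_eq_getElem payload 0 hb).symm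
          have hdrop : payload.drop b = payload.getD b 0 :: payload.drop (b + 1) := by
            rw [List.drop_eq_getElem_cons hb, hgd]
          have hrem' : (PySem.Int.band (payload.getD b 0) 0x0F :: pvNibs (payload.drop (b + 1))).length ≤ fuel := by
            rw [hdrop] at hrem
            simp only [pvNibs, List.flatMap_cons, List.cons_append, List.nil_append,
              List.length_cons] at hrem ⊢
            omega
          rw [decode_delta.loop, if_pos hc, if_neg (by omega)]
          simp only [PySem.List.pyGetD_natCast, hdrop, pvNibs, List.flatMap_cons]
          simp only [show ((4 * (1 - (0:Int))).toNat) = 4 by decide,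
            show PySem.Int.mod (0 + 1) 2 = 1 by decide,
            if_neg (by norm_num : ¬ (1 : Int) = 0)]
          split_ifs with hcont
          · have := ih payload count current result
              (PySem.Int.bor bb (PySem.Int.band (PySem.Int.band (payload.getD b 0 >>> (4 : Nat)) 0x0F) 0x07 <<< bs))
              (bs + 3) b 1 (Or.inr ⟨rfl, hb⟩) (by simpa using hrem')
            rw [if_pos (rfl : (1 : Int) = 1)] at this
            rw [this]
            conv_rhs => rw [List.cons_append, List.cons_append, pvAN]
            rw [if_pos hc, if_pos hcont]
            simp [pvNibs]
          · have := ih payload count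
              (current + PySem.Int.bor bb (PySem.Int.band (PySem.Int.band (payload.getD b 0 >>> (4 : Nat)) 0x0F) 0x07 <<< bs))
              (result ++ [current + PySem.Int.bor bb (PySem.Int.band (PySem.Int.band (payload.getD b 0 >>> (4 : Nat)) 0x0F) 0x07 <<< bs)])
              0 0 b 1 (Or.inr ⟨rfl, hb⟩) (by simpa using hrem')
            rw [if_pos (rfl : (1 : Int) = 1)] at this
            rw [this]
            conv_rhs => rw [List.cons_append, List.cons_append, pvAN]
            rw [if_pos hc, if_neg hcont]
            simp [pvNibs]
      · -- ni = 1 : next nibble is the low nibble of payload[b]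
        subst h1
        simp only [if_pos rfl] at hrem ⊢
        rw [decode_delta.loop, if_pos hc, if_neg (by omega)]
        simp only [PySem.List.pyGetD_natCast]
        simp only [show ((4 * (1 - (1:Int))).toNat) = 0 by decide,
          show PySem.Int.mod (1 + 1) 2 = 0 by decide, if_pos rfl]
        have hsr : payload.getD b 0 >>> (0:Nat) = payload.getD b 0 := by
          simp
        rw [hsr]
        have hcast : ((b : Int) + 1) = ((b + 1 : Nat) : Int) := by push_cast; ring
        rw [hcast]
        split_ifs with hcont
        · have := ih payload count current result
            (PySem.Int.bor bb (PySem.Int.band (PySem.Int.band (payload.getD b 0) 0x0F) 0x07 <<< bs))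
            (bs + 3) (b + 1) 0 (Or.inl rfl) (by simp at hrem ⊢; omega)
          simp only [if_neg (by norm_num : ¬ (0 : Int) = 1)] at this
          rw [this]
          conv_rhs => rw [pvAN]
          rw [if_pos hc, if_pos hcont]
        · have := ih payload count
            (current + PySem.Int.bor bb (PySem.Int.band (PySem.Int.band (payload.getD b 0) 0x0F) 0x07 <<< bs))
            (result ++ [current + PySem.Int.bor bb (PySem.Int.band (PySem.Int.band (payload.getD b 0) 0x0F) 0x07 <<< bs)])
            0 0 (b + 1) 0 (Or.inl rfl) (by simp at hrem ⊢; omega)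
          simp only [if_neg (by norm_num : ¬ (0 : Int) = 1)] at this
          rw [this]
          conv_rhs => rw [pvAN]
          rw [if_pos hc, if_neg hcont]
    · rw [decode_delta.loop, if_neg hc, pvAN_stop _ _ _ _ _ _ hc]

-- the nibble-stream loop in terms of pvCollect and prefix sums, when count exceeds result by j+1
lemma pvAN_eq : ∀ (nibs : List Int) (j : Nat) (current : Int) (result : List Int) (bb : Int) (bs : Nat),
    pvAN ((result.length : Int) + (j + 1)) nibs current result bb bs =
      (if j + 1 ≤ (pvCollect nibs bb bs).1.length then
        (current + ((pvCollect nibs bb bs).1.take (j + 1)).sum,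
         result ++ pvPsums current ((pvCollect nibs bb bs).1.take (j + 1)), 0, 0)
      else
        (current + (pvCollect nibs bb bs).1.sum,
         result ++ pvPsums current (pvCollect nibs bb bs).1,
         (pvCollect nibs bb bs).2.1, (pvCollect nibs bb bs).2.2)) := by
  intro nibs
  induction nibs with
  | nil => intro j current result bb bs; simp [pvAN, pvCollect, pvPsums]
  | cons nib rest ih =>
    intro j current result bb bs
    have hguard : (result.length : Int) < (result.length : Int) + (j + 1) := by omega
    rw [pvAN, if_pos hguard]
    by_cases h : PySem.Int.band nib 0x08 = 0
    · simp only [h, ne_eq, not_true_eq_false, if_false, pvCollect, if_true]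
      cases j with
      | zero =>
        rw [pvAN_stop _ _ _ _ _ _ (by simp)]
        simp [h, pvPsums]
      | succ jj =>
        have harg : (result.length : Int) + (↑(jj + 1) + 1) =
            ((result ++ [current + PySem.Int.bor bb (PySem.Int.band nib 0x07 <<< bs)]).length : Int) + (↑jj + 1) := by
          simp; omega
        rw [harg, ih jj]
        by_cases hle : jj + 1 ≤ (pvCollect rest 0 0).1.length
        · rw [if_pos hle, if_pos (by simp [h]; omega)]
          simp [h, pvPsums, List.take_succ_cons]
          ring
        · rw [if_neg hle, if_neg (by simp [h]; omega)]
          simp [h, pvPsums]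
          ring
    · simp only [h, ne_eq, not_false_eq_true, if_true, pvCollect, if_false]
      exact ih j current result _ _

-- B's foldl is pvCollect with a result accumulator
lemma foldl_eq_pvCollect : ∀ (nibs res : List Int) (acc : Int) (sh : Nat),
    nibs.foldl
      (fun (st : List Int × Int × Nat) nib =>
        let acc := PySem.Int.bor st.2.1 ((PySem.Int.band nib 0x07) <<< st.2.2)
        let shift := st.2.2 + 3
        if PySem.Int.band nib 0x08 = 0 then (st.1 ++ [acc], 0, 0) else (st.1, acc, shift))
      (res, acc, sh) =
      (res ++ (pvCollect nibs acc sh).1, (pvCollect nibs acc sh).2) := by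
  intro nibs
  induction nibs with
  | nil => simp [pvCollect]
  | cons nib rest ih =>
    intro res acc sh
    simp only [List.foldl_cons, pvCollect]
    by_cases h : PySem.Int.band nib 0x08 = 0
    · simp [h, ih]
    · simp [h, ih]

lemma pvPsums_append (c : Int) (ds : List Int) (a : Int) :
    pvPsums c (ds ++ [a]) = pvPsums c ds ++ [c + ds.sum + a] := by
  induction ds generalizing c with
  | nil => simp [pvPsums]
  | cons d ds ih => simp [pvPsums, ih]; ring_nf

lemma pvCollect_length : ∀ (nibs : List Int) (acc : Int) (sh : Nat),
    (pvCollect nibs acc sh).1.length =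
      (nibs.filter (fun n => PySem.Int.band n 0x08 == 0)).length := by
  intro nibs
  induction nibs with
  | nil => intro acc sh; rfl
  | cons nib rest ih =>
    intro acc sh
    simp only [pvCollect, List.filter_cons]
    by_cases h : PySem.Int.band nib 0x08 = 0
    · simp [h, ih]
    · simp [h, ih]

lemma pvCollect_trailing : ∀ (nibs : List Int) (acc : Int) (sh : Nat), nibs ≠ [] →
    ((pvCollect nibs acc sh).2.2 = 0 ↔ PySem.Int.band (nibs.getLast!) 0x08 = 0) := by
  intro nibs
  induction nibs with
  | nil => intro _ _ h; exact absurd rfl h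
  | cons nib rest ih =>
    intro acc sh _
    cases rest with
    | nil =>
      by_cases h : PySem.Int.band nib 0x08 = 0 <;>
        simp [pvCollect, h]
    | cons y ys =>
      have hne : y :: ys ≠ [] := by simp
      have hl : (nib :: y :: ys).getLast! = (y :: ys).getLast! := rfl
      by_cases h : PySem.Int.band nib 0x08 = 0
      · have h2 : (pvCollect (nib :: y :: ys) acc sh).2.2 = (pvCollect (y :: ys) 0 0).2.2 := by
          simp [pvCollect, h]
        rw [h2, hl]; exact ih 0 0 hne
      · have h2 : (pvCollect (nib :: y :: ys) acc sh).2.2 =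
            (pvCollect (y :: ys) (PySem.Int.bor acc (PySem.Int.band nib 0x07 <<< sh)) (sh + 3)).2.2 := by
          simp [pvCollect, h]
        rw [h2, hl]; exact ih _ _ hne

lemma psums_foldl : ∀ (ds : List Int) (c : Int) (res : List Int),
    (ds.foldl (fun (p : Int × List Int) d => (p.1 + d, p.2 ++ [p.1 + d])) (c, res)).2 =
      res ++ pvPsums c ds := by
  intro ds
  induction ds with
  | nil => simp [pvPsums]
  | cons d ds ih => intro c res; simp [pvPsums, ih]

-- ===== VERDICT (by name: the statement is the Claim_ definition above) =====
theorem decode_delta_spec : Claim_equal_decode_delta := by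
  intro payload count big_endian _ hPre
  obtain ⟨hc0, hPre⟩ := hPre
  have hloop := loop_eq_pvAN (2 * payload.length + 1) payload count 0 [] 0 0 0 0 (Or.inl rfl)
    (by simp [len_pvNibs])
  simp only [if_neg (by norm_num : ¬ (0 : Int) = 1), List.drop_zero, Nat.cast_zero] at hloop
  have hfold := foldl_eq_pvCollect (pvNibs payload) [] 0 0
  have hk : (((pvCollect (pvNibs payload) 0 0).1.length : Nat) : Int) = pvK payload := by
    rw [pvCollect_length]; rfl
  have hpv : payload.flatMap (fun (b : Int) => [PySem.Int.band (b >>> (4 : Nat)) 0x0F, PySem.Int.band b 0x0F]) = pvNibs payload := rfl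
  simp only [Spec_decode_delta, decode_delta, decode_delta_alt, hpv, hfold, hloop]
  simp only [List.nil_append]
  by_cases hcz : count = 0
  · subst hcz
    rw [pvAN_stop _ _ _ _ _ _ (by simp)]
    simp [PySem.List.slice]
  · have hj : count = ((count.toNat - 1 : Nat) : Int) + 1 := by omega
    have hAN := pvAN_eq (pvNibs payload) (count.toNat - 1) 0 [] 0 0
    simp only [List.length_nil, Nat.cast_zero, zero_add] at hAN
    rw [hj, hAN]
    rcases hPre with hle | ⟨hke, hne, hlast⟩
    · -- count ≤ k : A stops early with the first count deltas; B truncates the full delta list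
      have hlen : count.toNat - 1 + 1 ≤ (pvCollect (pvNibs payload) 0 0).1.length := by omega
      rw [if_pos hlen]
      have hcond : ¬ ((pvCollect (pvNibs payload) 0 0).2.2 > 0 ∧
          ((count.toNat - 1 : Nat) : Int) + 1 = (((pvCollect (pvNibs payload) 0 0).1.length : Nat) : Int) + 1) := by
        rintro ⟨-, habs⟩
        omega
      rw [if_neg hcond]
      have hslice : PySem.List.slice (pvCollect (pvNibs payload) 0 0).1 none
          (some (((count.toNat - 1 : Nat) : Int) + 1)) =
          (pvCollect (pvNibs payload) 0 0).1.take (count.toNat - 1 + 1) := by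
        rw [show (((count.toNat - 1 : Nat) : Int) + 1) = ((count.toNat - 1 + 1 : Nat) : Int) by push_cast; ring]
        exact PySem.List.slice_to_natCast _ _
      rw [hslice, psums_foldl]
      simp
    · -- count = k + 1 with a pending partial delta : A's trailing flush = B's appended acc
      have hne' : pvNibs payload ≠ [] := hne
      have hsh : (pvCollect (pvNibs payload) 0 0).2.2 ≠ 0 := by
        intro h0
        exact hlast ((pvCollect_trailing (pvNibs payload) 0 0 hne').mp h0)
      have hlen : ¬ (count.toNat - 1 + 1 ≤ (pvCollect (pvNibs payload) 0 0).1.length) := by omega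
      rw [if_neg hlen]
      have hcond : (pvCollect (pvNibs payload) 0 0).2.2 > 0 ∧
          ((count.toNat - 1 : Nat) : Int) + 1 = (((pvCollect (pvNibs payload) 0 0).1.length : Nat) : Int) + 1 := by
        constructor
        · omega
        · omega
      rw [if_pos hcond]
      have hslice : PySem.List.slice
          ((pvCollect (pvNibs payload) 0 0).1 ++ [(pvCollect (pvNibs payload) 0 0).2.1]) none
          (some (((count.toNat - 1 : Nat) : Int) + 1)) =
          (pvCollect (pvNibs payload) 0 0).1 ++ [(pvCollect (pvNibs payload) 0 0).2.1] := by
        rw [show (((count.toNat - 1 : Nat) : Int) + 1) = ((count.toNat - 1 + 1 : Nat) : Int) by push_cast; ring]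
        rw [PySem.List.slice_to_natCast]
        exact List.take_of_length_le (by simp; omega)
      rw [hslice, psums_foldl, pvPsums_append]
      simp [hsh]
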